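-- pv_equiv track=rewrite | github.com/dawoodaijaz97/Leetcode | twisted-mirror-path-count/solution.py | solve
-- ===== SOURCE A (Python) =====
-- MOD = 10**9 + 7
--
-- def solve(grid: list[list[int]]) -> int:
--     m, n = len(grid), len(grid[0])
--
--     # DP table to store the number of ways to reach each cell
--     dp = [[[0] * 2 for _ in range(n)] for _ in range(m)]
--     dp[0][0][0] = 1  # Starting point
--
--     for i in range(m):
--         for j in range(n):
--             if grid[i][j] == 0:
--                 # Move right
--                 if j > 0:
--                     dp[i][j][0] += dp[i][j-1][0]
--                     dp[i][j][0] %= MOD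
--                 # Move down
--                 if i > 0:
--                     dp[i][j][1] += dp[i-1][j][1]
--                     dp[i][j][1] %= MOD
--             else:
--                 # Reflect from right to down
--                 if j > 0 and dp[i][j-1][0] > 0:
--                     dp[i][j][1] += dp[i][j-1][0]
--                     dp[i][j][1] %= MOD
--                 # Reflect from down to right
--                 if i > 0 and dp[i-1][j][1] > 0:
--                     dp[i][j][0] += dp[i-1][j][1]
--                     dp[i][j][0] %= MOD
--
--     return (dp[m-1][n-1][0] + dp[m-1][n-1][1]) % MOD
-- ===== SOURCE B (Python) =====
-- MOD = 10**9 + 7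
--
-- def solve(grid: list[list[int]]) -> int:
--     # Each dp value of the mirror DP is 0 or 1 and inherits from exactly one
--     # predecessor, so the answer is found by following two backward walks.
--     m, n = len(grid), len(grid[0])
--
--     def walk(i, j, d):
--         while True:
--             if i == 0 and j == 0:
--                 return 1 if d == 0 else 0
--             if grid[i][j] == 0:
--                 if d == 0:
--                     if j == 0:
--                         return 0
--                     j -= 1
--                 else:
--                     if i == 0:
--                         return 0
--                     i -= 1
--             else:
--                 if d == 0:
--                     if i == 0:
--                         return 0
--                     i, d = i - 1, 1
--                 else:
--                     if j == 0:
--                         return 0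
--                     j, d = j - 1, 0
--
--     return (walk(m - 1, n - 1, 0) + walk(m - 1, n - 1, 1)) % MOD
-- ===== Notes on version B (the rewrite author's own statement) =====
-- stated objective: faster
-- what changed: Replaced the full m*n*2 DP table with two backward path-following walks: every DP value is 0 or 1 and inherits from exactly one predecessor, so the answer is computed by deterministically walking each of the two final states back toward (0,0).
-- outside the precondition, e.g. on solve([[0, 0], [0]]): A raises IndexError, B raises IndexError
import Mathlib
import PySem

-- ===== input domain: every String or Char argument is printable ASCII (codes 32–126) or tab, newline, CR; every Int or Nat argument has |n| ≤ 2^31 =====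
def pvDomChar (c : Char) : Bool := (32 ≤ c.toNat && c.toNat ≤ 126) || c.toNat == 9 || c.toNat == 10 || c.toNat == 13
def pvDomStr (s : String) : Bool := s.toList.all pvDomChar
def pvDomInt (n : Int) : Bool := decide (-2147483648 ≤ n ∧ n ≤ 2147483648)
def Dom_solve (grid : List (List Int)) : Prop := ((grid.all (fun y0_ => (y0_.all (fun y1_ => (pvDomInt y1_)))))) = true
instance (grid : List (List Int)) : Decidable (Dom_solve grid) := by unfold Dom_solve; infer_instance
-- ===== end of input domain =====

-- B replaces A's m*n*2 DP table by two backward predecessor walks; objective: faster.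

def pvMOD : Int := 1000000007

-- shared helper: grid[i][j] (always in range on the admitted inputs)
def cell (grid : List (List Int)) (i j : Nat) : Int := (grid.getD i []).getD j 0

-- ===== PORT A =====
-- dp[i][j][d] read, and in-place write, of the nested-list table
def tget (dp : List (List (List Int))) (i j d : Nat) : Int :=
  ((dp.getD i []).getD j []).getD d 0

def tset (dp : List (List (List Int))) (i j d : Nat) (v : Int) : List (List (List Int)) :=
  dp.set i ((dp.getD i []).set j (((dp.getD i []).getD j []).set d v))

-- "dp[i][j][d] += src; dp[i][j][d] %= MOD"
def upd (dp : List (List (List Int))) (i j d : Nat) (src : Int) : List (List (List Int)) :=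
  tset dp i j d (PySem.Int.mod (tget dp i j d + src) pvMOD)

-- the four guarded in-place updates of A's loop body, in source order
def stepA1 (i j : Nat) (dp : List (List (List Int))) : List (List (List Int)) :=
  if 0 < j then upd dp i j 0 (tget dp i (j-1) 0) else dp
def stepA2 (i j : Nat) (dp : List (List (List Int))) : List (List (List Int)) :=
  if 0 < i then upd dp i j 1 (tget dp (i-1) j 1) else dp
def stepB1 (i j : Nat) (dp : List (List (List Int))) : List (List (List Int)) :=
  if 0 < j ∧ 0 < tget dp i (j-1) 0 then upd dp i j 1 (tget dp i (j-1) 0) else dp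
def stepB2 (i j : Nat) (dp : List (List (List Int))) : List (List (List Int)) :=
  if 0 < i ∧ 0 < tget dp (i-1) j 1 then upd dp i j 0 (tget dp (i-1) j 1) else dp

def cellStep (grid : List (List Int)) (i j : Nat) (dp : List (List (List Int))) :
    List (List (List Int)) :=
  if cell grid i j = 0 then stepA2 i j (stepA1 i j dp) else stepB2 i j (stepB1 i j dp)

def solve (grid : List (List Int)) : Int :=
  let m := grid.length
  let n := (grid.getD 0 []).length
  let dp0 := tset (List.replicate m (List.replicate n (List.replicate 2 (0:Int)))) 0 0 0 1
  let dp := (List.range m).foldl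
    (fun acc i => (List.range n).foldl (fun acc2 j => cellStep grid i j acc2) acc) dp0
  PySem.Int.mod (tget dp (m-1) (n-1) 0 + tget dp (m-1) (n-1) 1) pvMOD

-- ===== PORT B =====
-- follow the unique predecessor chain of state (i, j, d) back towards (0, 0)
def walk (grid : List (List Int)) (i j : Nat) (d : Bool) : Int :=
  if i = 0 ∧ j = 0 then (if d = false then 1 else 0)
  else if cell grid i j = 0 then
    if d = false then (if _hj : j = 0 then 0 else walk grid i (j-1) false)
    else (if _hi : i = 0 then 0 else walk grid (i-1) j true)
  else
    if d = false then (if _hi : i = 0 then 0 else walk grid (i-1) j true)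
    else (if _hj : j = 0 then 0 else walk grid i (j-1) false)
termination_by i + j
decreasing_by all_goals omega

def solve_alt (grid : List (List Int)) : Int :=
  let m := grid.length
  let n := (grid.getD 0 []).length
  PySem.Int.mod (walk grid (m-1) (n-1) false + walk grid (m-1) (n-1) true) pvMOD

-- ===== PRECONDITION & SPEC =====
-- Pre_ excludes exactly the inputs where A raises IndexError: the empty grid,
-- an empty first row, and grids with some row shorter than the first row.
def Pre_solve (grid : List (List Int)) : Prop :=
  grid ≠ [] ∧ 0 < (grid.getD 0 []).length ∧ ∀ row ∈ grid, (grid.getD 0 []).length ≤ row.length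
instance (grid : List (List Int)) : Decidable (Pre_solve grid) := by unfold Pre_solve; infer_instance

def pvWitness_solve : List (List Int) := [[0, 1], [1, 0]]

def Spec_solve (grid : List (List Int)) (out : Int) : Prop := out = solve_alt grid
instance (grid : List (List Int)) (out : Int) : Decidable (Spec_solve grid out) := by unfold Spec_solve; infer_instance

-- ===== CLAIM (what is proved, stated in full; the proofs are below) =====
def Claim_equal_solve : Prop := ∀ (grid : List (List Int)), Dom_solve grid → Pre_solve grid → Spec_solve grid (solve grid)

-- ===== LEMMAS AND PROOFS =====

-- walk value indexed by a Nat direction, and the pre-loop table content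
def wv (grid : List (List Int)) (i j d : Nat) : Int :=
  if d = 0 then walk grid i j false else walk grid i j true
def initv (i j d : Nat) : Int := if i = 0 ∧ j = 0 ∧ d = 0 then 1 else 0

def Shape (m n : Nat) (dp : List (List (List Int))) : Prop :=
  dp.length = m ∧ ∀ i < m, (dp.getD i []).length = n ∧ ∀ j < n, ((dp.getD i []).getD j []).length = 2

-- loop invariant: cells before position k in row-major order hold the walk value,
-- the rest still hold the pre-loop content
def TblInv (grid : List (List Int)) (m n k : Nat) (dp : List (List (List Int))) : Prop :=
  Shape m n dp ∧ ∀ i j d, i < m → j < n → d < 2 →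
    tget dp i j d = if i * n + j < k then wv grid i j d else initv i j d

theorem getD_set' {α : Type} (l : List α) (a b : Nat) (v dflt : α) (h : a < l.length) :
    (l.set a v).getD b dflt = if a = b then v else l.getD b dflt := by
  rcases eq_or_ne a b with rfl | hne
  · simp [List.getD, h]
  · simp [List.getD, List.getElem?_set_ne hne, hne]

theorem getD_replicate' {α : Type} (m : Nat) (x dflt : α) (i : Nat) :
    (List.replicate m x).getD i dflt = if i < m then x else dflt := by
  split_ifs with h
  · simp [List.getD, h]
  · rw [List.getD, List.getElem?_eq_none (by simpa using h)]; rfl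

theorem tget_tset (dp : List (List (List Int))) (i j d i' j' d' : Nat) (v : Int)
    (h1 : i < dp.length) (h2 : j < (dp.getD i []).length)
    (h3 : d < ((dp.getD i []).getD j []).length) :
    tget (tset dp i j d v) i' j' d' =
      if i = i' ∧ j = j' ∧ d = d' then v else tget dp i' j' d' := by
  unfold tget tset
  rw [getD_set' _ _ _ _ _ h1]
  by_cases hii : i = i'
  · subst hii
    rw [if_pos rfl, getD_set' _ _ _ _ _ h2]
    by_cases hjj : j = j'
    · subst hjj
      rw [if_pos rfl, getD_set' _ _ _ _ _ h3]
      by_cases hdd : d = d'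
      · simp [hdd]
      · simp [hdd]
    · simp [hjj]
  · simp [hii]

theorem shape_tset {m n : Nat} {dp : List (List (List Int))} (hs : Shape m n dp)
    {i j : Nat} (hi : i < m) (hj : j < n) (d : Nat) (v : Int) :
    Shape m n (tset dp i j d v) := by
  obtain ⟨hl, hrow⟩ := hs
  refine ⟨by simp [tset, hl], ?_⟩
  intro i' hi'
  rw [tset, getD_set' _ _ _ _ _ (by rw [hl]; exact hi)]
  by_cases hii : i = i'
  · subst hii
    rw [if_pos rfl]
    refine ⟨by simpa [List.getD] using (hrow i hi).1, ?_⟩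
    intro j' hj'
    rw [getD_set' _ _ _ _ _ (by rw [(hrow i hi).1]; exact hj)]
    by_cases hjj : j = j'
    · subst hjj; rw [if_pos rfl]; simpa [List.getD] using (hrow i hi).2 j hj
    · rw [if_neg hjj]; exact (hrow i hi).2 j' hj'
  · rw [if_neg hii]; exact hrow i' hi'

-- generic fact for one guarded in-place update
theorem guard_upd_get {m n : Nat} {dp : List (List (List Int))} (hs : Shape m n dp)
    {i j d : Nat} (hi : i < m) (hj : j < n) (hd : d < 2) (c : Prop) [Decidable c]
    (src : Int) (i' j' d' : Nat) :
    tget (if c then upd dp i j d src else dp) i' j' d' =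
      if c ∧ i' = i ∧ j' = j ∧ d' = d then PySem.Int.mod (tget dp i j d + src) pvMOD
      else tget dp i' j' d' := by
  have h1 : i < dp.length := by rw [hs.1]; exact hi
  have h2 : j < (dp.getD i []).length := by rw [(hs.2 i hi).1]; exact hj
  have h3 : d < ((dp.getD i []).getD j []).length := by rw [(hs.2 i hi).2 j hj]; exact hd
  by_cases hc : c
  · rw [if_pos hc, upd, tget_tset _ _ _ _ _ _ _ _ h1 h2 h3]
    by_cases h : i' = i ∧ j' = j ∧ d' = d
    · obtain ⟨e1, e2, e3⟩ := h; subst e1; subst e2; subst e3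
      rw [if_pos ⟨rfl, rfl, rfl⟩, if_pos ⟨hc, rfl, rfl, rfl⟩]
    · rw [if_neg (fun hx => h ⟨hx.1.symm, hx.2.1.symm, hx.2.2.symm⟩),
        if_neg (fun hx => h hx.2)]
  · rw [if_neg hc, if_neg (fun hx => hc hx.1)]

theorem guard_upd_shape {m n : Nat} {dp : List (List (List Int))} (hs : Shape m n dp)
    {i j : Nat} (hi : i < m) (hj : j < n) (d : Nat) (c : Prop) [Decidable c] (src : Int) :
    Shape m n (if c then upd dp i j d src else dp) := by
  split_ifs
  · exact shape_tset hs hi hj _ _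
  · exact hs

theorem walk_01 (grid : List (List Int)) (i j : Nat) (d : Bool) :
    walk grid i j d = 0 ∨ walk grid i j d = 1 := by
  fun_induction walk <;> simp_all

theorem mod01 {x : Int} (h : x = 0 ∨ x = 1) : PySem.Int.mod x pvMOD = x := by
  rcases h with rfl | rfl <;> decide

theorem walk_s00 (grid : List (List Int)) (d : Bool) :
    walk grid 0 0 d = if d = false then 1 else 0 := by
  rw [walk.eq_def]; simp

theorem walk_g0_f {grid : List (List Int)} {i j : Nat} (h : ¬(i = 0 ∧ j = 0))
    (hg : cell grid i j = 0) :
    walk grid i j false = if j = 0 then 0 else walk grid i (j-1) false := by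
  rw [walk.eq_def]; simp [h, hg]

theorem walk_g0_t {grid : List (List Int)} {i j : Nat} (h : ¬(i = 0 ∧ j = 0))
    (hg : cell grid i j = 0) :
    walk grid i j true = if i = 0 then 0 else walk grid (i-1) j true := by
  rw [walk.eq_def]; simp [h, hg]

theorem walk_g1_f {grid : List (List Int)} {i j : Nat} (h : ¬(i = 0 ∧ j = 0))
    (hg : cell grid i j ≠ 0) :
    walk grid i j false = if i = 0 then 0 else walk grid (i-1) j true := by
  rw [walk.eq_def]; simp [h, hg]

theorem walk_g1_t {grid : List (List Int)} {i j : Nat} (h : ¬(i = 0 ∧ j = 0))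
    (hg : cell grid i j ≠ 0) :
    walk grid i j true = if j = 0 then 0 else walk grid i (j-1) false := by
  rw [walk.eq_def]; simp [h, hg]

theorem rm_inj {n i j i' j' : Nat} (hn : j < n) (hn' : j' < n)
    (h : i' * n + j' = i * n + j) : i' = i ∧ j' = j := by
  have hn0 : 0 < n := by omega
  have e1 : (n * i' + j') / n = i' + j' / n := Nat.mul_add_div hn0 _ _
  have e2 : (n * i + j) / n = i + j / n := Nat.mul_add_div hn0 _ _
  rw [Nat.div_eq_of_lt hn'] at e1
  rw [Nat.div_eq_of_lt hn] at e2
  rw [mul_comm i' n, mul_comm i n] at h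
  have hii : i' = i := by rw [h] at e1; omega
  subst hii
  exact ⟨rfl, Nat.add_left_cancel h⟩

theorem up_lt {i n : Nat} (hi : 0 < i) (hn0 : 0 < n) (j : Nat) :
    (i-1) * n + j < i * n + j := by
  have h1 : (i-1) * n + n = i * n := by
    cases i with
    | zero => omega
    | succ k => simp [Nat.succ_mul]
  omega

-- values of the cell-step output, stated pointwise
theorem step_get (grid : List (List Int)) {m n i j : Nat} {dp : List (List (List Int))}
    (hm : i < m) (hn : j < n) (hinv : TblInv grid m n (i*n+j) dp) :
    ∀ a b c : Nat, a < m → b < n → c < 2 →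
      tget (cellStep grid i j dp) a b c =
        if a = i ∧ b = j then wv grid i j c else tget dp a b c := by
  obtain ⟨hs, H⟩ := hinv
  have cur : ∀ d, d < 2 → tget dp i j d = initv i j d := by
    intro d hd; rw [H i j d hm hn hd, if_neg (by omega)]
  have left : 0 < j → tget dp i (j-1) 0 = walk grid i (j-1) false := by
    intro hj
    rw [H i (j-1) 0 hm (by omega) (by omega), if_pos (by omega)]
    unfold wv; rw [if_pos rfl]
  have upv : 0 < i → tget dp (i-1) j 1 = walk grid (i-1) j true := by
    intro hi
    rw [H (i-1) j 1 (by omega) hn (by omega), if_pos (up_lt hi (by omega) j)]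
    unfold wv; rw [if_neg (by omega)]
  -- the two written values and the untouched rest, one case of the loop body at a time
  have key : ∀ a b c : Nat, c < 2 →
      tget (cellStep grid i j dp) a b c =
        if a = i ∧ b = j then wv grid i j c else tget dp a b c := by
    by_cases h00 : i = 0 ∧ j = 0
    · obtain ⟨rfl, rfl⟩ := h00
      have hid : cellStep grid 0 0 dp = dp := by
        unfold cellStep stepA1 stepA2 stepB1 stepB2; simp
      intro a b c hc
      rw [hid]
      by_cases hab : a = 0 ∧ b = 0
      · rw [if_pos hab, hab.1, hab.2, cur c hc]
        have : c = 0 ∨ c = 1 := by omega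
        rcases this with rfl | rfl
        · unfold initv wv; rw [if_pos ⟨rfl, rfl, rfl⟩, if_pos rfl, walk_s00, if_pos rfl]
        · unfold initv wv
          rw [if_neg (by omega), if_neg (by omega), walk_s00, if_neg (by simp)]
      · rw [if_neg hab]
    · have i0 : initv i j 0 = 0 := by
        unfold initv; rw [if_neg (fun hx => h00 ⟨hx.1, hx.2.1⟩)]
      have i1 : initv i j 1 = 0 := by
        unfold initv; rw [if_neg (by omega)]
      by_cases hg : cell grid i j = 0
      · -- grid[i][j] == 0 : inherit straight moves
        have sA1 : Shape m n (stepA1 i j dp) := by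
          unfold stepA1; exact guard_upd_shape hs hm hn _ _ _
        have e1 : ∀ a b c : Nat, tget (stepA1 i j dp) a b c =
            if 0 < j ∧ a = i ∧ b = j ∧ c = 0 then
              PySem.Int.mod (tget dp i j 0 + tget dp i (j-1) 0) pvMOD
            else tget dp a b c := by
          intro a b c; unfold stepA1; exact guard_upd_get hs hm hn (by omega) _ _ _ _ _
        have e2 : ∀ a b c : Nat, tget (stepA2 i j (stepA1 i j dp)) a b c =
            if 0 < i ∧ a = i ∧ b = j ∧ c = 1 then
              PySem.Int.mod (tget (stepA1 i j dp) i j 1 + tget (stepA1 i j dp) (i-1) j 1) pvMOD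
            else tget (stepA1 i j dp) a b c := by
          intro a b c; unfold stepA2; exact guard_upd_get sA1 hm hn (by omega) _ _ _ _ _
        have r1 : tget (stepA1 i j dp) i j 1 = 0 := by
          rw [e1 i j 1, if_neg (fun hx => absurd hx.2.2.2 (by omega)), cur 1 (by omega), i1]
        have v0 : tget (stepA2 i j (stepA1 i j dp)) i j 0 = wv grid i j 0 := by
          unfold wv; rw [if_pos rfl, walk_g0_f h00 hg,
            e2 i j 0, if_neg (fun hx : 0 < i ∧ i = i ∧ j = j ∧ 0 = 1 => absurd hx.2.2.2 (by omega)),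
            e1 i j 0]
          by_cases hj : 0 < j
          · rw [if_pos ⟨hj, rfl, rfl, rfl⟩, if_neg (by omega), cur 0 (by omega), i0,
              left hj, zero_add, mod01 (walk_01 ..)]
          · rw [if_neg (fun hx => hj hx.1), if_pos (by omega), cur 0 (by omega), i0]
        have v1 : tget (stepA2 i j (stepA1 i j dp)) i j 1 = wv grid i j 1 := by
          unfold wv; rw [if_neg (by omega), walk_g0_t h00 hg, e2 i j 1]
          by_cases hi : 0 < i
          · have r2 : tget (stepA1 i j dp) (i-1) j 1 = walk grid (i-1) j true := by
              rw [e1 (i-1) j 1, if_neg (fun hx => absurd hx.2.1 (by omega)), upv hi]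
            rw [if_pos ⟨hi, rfl, rfl, rfl⟩, r1, r2, zero_add, mod01 (walk_01 ..),
              if_neg (by omega)]
          · rw [if_neg (fun hx => hi hx.1), r1, if_pos (by omega)]
        intro a b c hc
        rw [cellStep, if_pos hg]
        by_cases hab : a = i ∧ b = j
        · rw [if_pos hab, hab.1, hab.2]
          have : c = 0 ∨ c = 1 := by omega
          rcases this with rfl | rfl
          · exact v0
          · exact v1
        · rw [if_neg hab, e2 a b c, if_neg (fun hx => hab ⟨hx.2.1, hx.2.2.1⟩), e1 a b c,
            if_neg (fun hx => hab ⟨hx.2.1, hx.2.2.1⟩)]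
      · -- grid[i][j] != 0 : reflect
        have sB1 : Shape m n (stepB1 i j dp) := by
          unfold stepB1; exact guard_upd_shape hs hm hn _ _ _
        have e1 : ∀ a b c : Nat, tget (stepB1 i j dp) a b c =
            if (0 < j ∧ 0 < tget dp i (j-1) 0) ∧ a = i ∧ b = j ∧ c = 1 then
              PySem.Int.mod (tget dp i j 1 + tget dp i (j-1) 0) pvMOD
            else tget dp a b c := by
          intro a b c; unfold stepB1; exact guard_upd_get hs hm hn (by omega) _ _ _ _ _
        have e2 : ∀ a b c : Nat, tget (stepB2 i j (stepB1 i j dp)) a b c =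
            if (0 < i ∧ 0 < tget (stepB1 i j dp) (i-1) j 1) ∧ a = i ∧ b = j ∧ c = 0 then
              PySem.Int.mod (tget (stepB1 i j dp) i j 0 + tget (stepB1 i j dp) (i-1) j 1) pvMOD
            else tget (stepB1 i j dp) a b c := by
          intro a b c; unfold stepB2; exact guard_upd_get sB1 hm hn (by omega) _ _ _ _ _
        have r0 : tget (stepB1 i j dp) i j 0 = 0 := by
          rw [e1 i j 0, if_neg (fun hx => absurd hx.2.2.2 (by omega)), cur 0 (by omega), i0]
        have r2 : 0 < i → tget (stepB1 i j dp) (i-1) j 1 = walk grid (i-1) j true := by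
          intro hi
          rw [e1 (i-1) j 1, if_neg (fun hx => absurd hx.2.1 (by omega)), upv hi]
        have v1 : tget (stepB2 i j (stepB1 i j dp)) i j 1 = wv grid i j 1 := by
          unfold wv; rw [if_neg (by omega), walk_g1_t h00 hg, e2 i j 1,
            if_neg (fun hx : (0 < i ∧ 0 < tget (stepB1 i j dp) (i-1) j 1) ∧ i = i ∧ j = j ∧ 1 = 0 =>
              absurd hx.2.2.2 (by omega)),
            e1 i j 1]
          by_cases hj : 0 < j
          · rcases walk_01 grid i (j-1) false with w0 | w1
            · rw [if_neg (fun hx => by rw [left hj, w0] at hx; exact absurd hx.1.2 (by norm_num)),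
                cur 1 (by omega), i1, if_neg (by omega), w0]
            · rw [if_pos ⟨⟨hj, by rw [left hj, w1]; norm_num⟩, rfl, rfl, rfl⟩,
                cur 1 (by omega), i1, left hj, w1, if_neg (by omega)]
              decide
          · rw [if_neg (fun hx => hj hx.1.1), if_pos (by omega), cur 1 (by omega), i1]
        have v0 : tget (stepB2 i j (stepB1 i j dp)) i j 0 = wv grid i j 0 := by
          unfold wv; rw [if_pos rfl, walk_g1_f h00 hg, e2 i j 0]
          by_cases hi : 0 < i
          · rcases walk_01 grid (i-1) j true with w0 | w1
            · rw [if_neg (fun hx => by rw [r2 hi, w0] at hx; exact absurd hx.1.2 (by norm_num)),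
                r0, if_neg (by omega), w0]
            · rw [if_pos ⟨⟨hi, by rw [r2 hi, w1]; norm_num⟩, rfl, rfl, rfl⟩, r0, r2 hi, w1,
                if_neg (by omega)]
              decide
          · rw [if_neg (fun hx => hi hx.1.1), r0, if_pos (by omega)]
        intro a b c hc
        rw [cellStep, if_neg hg]
        by_cases hab : a = i ∧ b = j
        · rw [if_pos hab, hab.1, hab.2]
          have : c = 0 ∨ c = 1 := by omega
          rcases this with rfl | rfl
          · exact v0
          · exact v1
        · rw [if_neg hab, e2 a b c, if_neg (fun hx => hab ⟨hx.2.1, hx.2.2.1⟩), e1 a b c,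
            if_neg (fun hx => hab ⟨hx.2.1, hx.2.2.1⟩)]
  intro a b c _ _ hc
  exact key a b c hc

theorem shape_cellStep (grid : List (List Int)) {m n i j : Nat} {dp : List (List (List Int))}
    (hm : i < m) (hn : j < n) (hs : Shape m n dp) : Shape m n (cellStep grid i j dp) := by
  unfold cellStep
  split_ifs with hg
  · have sA1 : Shape m n (stepA1 i j dp) := by
      unfold stepA1; exact guard_upd_shape hs hm hn _ _ _
    unfold stepA2; exact guard_upd_shape sA1 hm hn _ _ _
  · have sB1 : Shape m n (stepB1 i j dp) := by
      unfold stepB1; exact guard_upd_shape hs hm hn _ _ _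
    unfold stepB2; exact guard_upd_shape sB1 hm hn _ _ _

-- THE step lemma: processing cell (i, j) extends the invariant by one position
theorem step_inv (grid : List (List Int)) {m n i j : Nat} {dp : List (List (List Int))}
    (hm : i < m) (hn : j < n) (hinv : TblInv grid m n (i*n+j) dp) :
    TblInv grid m n (i*n+j+1) (cellStep grid i j dp) := by
  refine ⟨shape_cellStep grid hm hn hinv.1, ?_⟩
  intro a b c ha hb hc
  rw [step_get grid hm hn hinv a b c ha hb hc]
  by_cases hab : a = i ∧ b = j
  · obtain ⟨rfl, rfl⟩ := hab
    rw [if_pos ⟨rfl, rfl⟩, if_pos (by omega)]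
  · rw [if_neg hab, hinv.2 a b c ha hb hc]
    have hne : a * n + b ≠ i * n + j := fun he => hab ⟨(rm_inj hn hb he).1, (rm_inj hn hb he).2⟩
    by_cases hlt : a * n + b < i * n + j
    · rw [if_pos hlt, if_pos (by omega)]
    · rw [if_neg hlt, if_neg (by omega)]

theorem inner_inv (grid : List (List Int)) {m n i : Nat} {dp : List (List (List Int))}
    (hm : i < m) :
    ∀ j, j ≤ n → TblInv grid m n (i*n) dp →
      TblInv grid m n (i*n+j) ((List.range j).foldl (fun acc2 j' => cellStep grid i j' acc2) dp) := by
  intro j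
  induction j with
  | zero => intro _ h; simpa using h
  | succ k ih =>
    intro hk h
    rw [List.range_succ, List.foldl_append, List.foldl_cons, List.foldl_nil]
    have := step_inv grid hm (show k < n by omega) (ih (by omega) h)
    exact this

theorem outer_inv (grid : List (List Int)) {m n : Nat} {dp : List (List (List Int))} :
    ∀ i, i ≤ m → TblInv grid m n 0 dp →
      TblInv grid m n (i*n)
        ((List.range i).foldl
          (fun acc i' => (List.range n).foldl (fun acc2 j => cellStep grid i' j acc2) acc) dp) := by
  intro i
  induction i with
  | zero => intro _ h; simpa using h
  | succ k ih =>
    intro hk h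
    rw [List.range_succ, List.foldl_append, List.foldl_cons, List.foldl_nil]
    have := inner_inv grid (show k < m by omega) n (le_refl n) (ih (by omega) h)
    rw [Nat.succ_mul]
    exact this

theorem init_inv (grid : List (List Int)) {m n : Nat} (hm : 0 < m) (hn : 0 < n) :
    TblInv grid m n 0 (tset (List.replicate m (List.replicate n (List.replicate 2 (0:Int)))) 0 0 0 1) := by
  have hs0 : Shape m n (List.replicate m (List.replicate n (List.replicate 2 (0:Int)))) := by
    refine ⟨by simp, ?_⟩
    intro i hi
    rw [getD_replicate' _ _ _ _, if_pos hi]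
    refine ⟨by simp, ?_⟩
    intro j hj
    rw [getD_replicate' _ _ _ _, if_pos hj]
    simp
  refine ⟨shape_tset hs0 hm hn _ _, ?_⟩
  intro i j d hi hj hd
  rw [if_neg (by omega)]
  have h1 : (0:Nat) < (List.replicate m (List.replicate n (List.replicate 2 (0:Int)))).length := by
    simpa using hm
  have h2 : (0:Nat) < ((List.replicate m (List.replicate n (List.replicate 2 (0:Int)))).getD 0 []).length := by
    rw [(hs0.2 0 hm).1]; exact hn
  have h3 : (0:Nat) < (((List.replicate m (List.replicate n (List.replicate 2 (0:Int)))).getD 0 []).getD 0 []).length := by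
    rw [(hs0.2 0 hm).2 0 hn]; omega
  rw [tget_tset _ _ _ _ _ _ _ _ h1 h2 h3]
  have base : tget (List.replicate m (List.replicate n (List.replicate 2 (0:Int)))) i j d = 0 := by
    unfold tget
    rw [getD_replicate' _ _ _ _, if_pos hi, getD_replicate' _ _ _ _, if_pos hj,
      getD_replicate' _ _ _ _]
    split_ifs
    all_goals rfl
  split_ifs with h
  · unfold initv; rw [if_pos ⟨h.1.symm, h.2.1.symm, h.2.2.symm⟩]
  · rw [base]; unfold initv; rw [if_neg (by tauto)]

-- ===== VERDICT (by name: the statement is the Claim_ definition above) =====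
theorem solve_spec : Claim_equal_solve := by
  unfold Claim_equal_solve
  intro grid _ hpre
  obtain ⟨hne, hn, hrows⟩ := hpre
  have hm : 0 < grid.length := by
    cases grid with
    | nil => exact absurd rfl hne
    | cons x xs => simp
  unfold Spec_solve solve solve_alt
  dsimp only
  have hinv := outer_inv grid grid.length (le_refl _) (init_inv grid hm hn)
  have hfin : (grid.length - 1) * (grid.getD 0 []).length + ((grid.getD 0 []).length - 1)
      < grid.length * (grid.getD 0 []).length := by
    have h1 : (grid.length - 1) * (grid.getD 0 []).length + (grid.getD 0 []).length
        = grid.length * (grid.getD 0 []).length := by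
      cases hgl : grid.length with
      | zero => omega
      | succ k => simp [Nat.succ_mul]
    omega
  rw [hinv.2 (grid.length - 1) ((grid.getD 0 []).length - 1) 0 (by omega) (by omega) (by omega),
    if_pos hfin,
    hinv.2 (grid.length - 1) ((grid.getD 0 []).length - 1) 1 (by omega) (by omega) (by omega),
    if_pos hfin]
  unfold wv
  rw [if_pos rfl, if_neg (by omega)]
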